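-- pv_equiv track=rewrite | github.com/tiulia/FSJP-GA | main.py | OS_Crossover
-- ===== SOURCE A (Python) =====
-- def OS_Crossover(OS_P1, OS_P2):
--     n = len(OS_P1)
--     cross_boundary = n // 2 - 1
--
--     OS_C1 = [0] * n
--     OS_C2 = [0] * n
--
--     for i in range(n):
--         if(OS_P1[i] < cross_boundary):
--             OS_C1[i] = OS_P1[i]
--
--         if (OS_P2[i]  < cross_boundary):
--             OS_C2[i] = OS_P2[i]
--
--     index = 0
--     for i in range(n):
--         if(OS_P2[i] >= cross_boundary):
--             while OS_C1[index] != 0: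
--                 index += 1
--             OS_C1[index] = OS_P2[i]
--
--     index = 0
--     for i in range(n):
--         if (OS_P1[i] >= cross_boundary):
--             while OS_C2[index] != 0:
--                 index += 1
--             OS_C2[index] = OS_P1[i]
--
--     return OS_C1, OS_C2
-- ===== SOURCE B (Python) =====
-- def OS_Crossover(OS_P1, OS_P2):
--     n = len(OS_P1)
--     cross_boundary = n // 2 - 1
--
--     def weave(parent, fill):
--         # one pass: keep a gene below the boundary, otherwise take the next
--         # fill gene from the other parent (0 once the fill genes run out)
--         child = []
--         k = 0
--         for v in parent:
--             if v < cross_boundary and v != 0: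
--                 child.append(v)
--             elif k < len(fill):
--                 child.append(fill[k])
--                 k += 1
--             else:
--                 child.append(0)
--         return child
--
--     P2 = OS_P2[:n]
--     fill1 = [v for v in P2 if v >= cross_boundary]
--     fill2 = [v for v in OS_P1 if v >= cross_boundary]
--     return weave(OS_P1, fill1), weave(P2, fill2)
-- ===== Notes on version B (the rewrite author's own statement) =====
-- stated objective: alternative
-- what changed: A builds zero-holed children and then mutates them in place with an index-advancing while-scan per fill gene; B never materializes a holed child: it constructs each child in one left-to-right pass that emits either the kept parent gene or the next fill gene from a precomputed fill list (0 once fills run out), with no mutation and no slot scanning.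
-- outside the precondition, e.g. on OS_Crossover([0, 2], [-1, 2]): A returns ([2, 0], [-1, 2]), B returns ([2, 0], [-1, 0])
import Mathlib
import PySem

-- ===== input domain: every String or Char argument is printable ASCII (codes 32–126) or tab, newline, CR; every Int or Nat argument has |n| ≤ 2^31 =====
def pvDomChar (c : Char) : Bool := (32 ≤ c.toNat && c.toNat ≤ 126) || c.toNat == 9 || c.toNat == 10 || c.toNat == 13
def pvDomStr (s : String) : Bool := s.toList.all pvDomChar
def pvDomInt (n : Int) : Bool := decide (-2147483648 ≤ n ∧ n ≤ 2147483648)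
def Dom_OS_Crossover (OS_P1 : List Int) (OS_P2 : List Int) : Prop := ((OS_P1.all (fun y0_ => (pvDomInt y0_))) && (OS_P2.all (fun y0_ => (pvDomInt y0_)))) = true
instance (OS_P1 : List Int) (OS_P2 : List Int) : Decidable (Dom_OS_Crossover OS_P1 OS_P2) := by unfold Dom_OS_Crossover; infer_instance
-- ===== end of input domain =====

-- B replaces A's mutate-in-place copy-then-scan-and-fill passes by a single left-to-right
-- weave pass per child that emits kept genes or the next fill gene (alternative, same cost).

-- ===== PORT A =====
-- the 'while OS_C1[index] != 0: index += 1' scan (returns C.length where Python would raise IndexError; outside Pre_)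
def pvSkip (C : List Int) (idx : Nat) : Nat :=
  if h : idx < C.length then
    if C.getD idx 0 ≠ 0 then pvSkip C (idx + 1) else idx
  else idx
termination_by C.length - idx

def OS_Crossover (OS_P1 : List Int) (OS_P2 : List Int) : List Int × List Int :=
  let n := OS_P1.length
  let cross_boundary : Int := PySem.Int.floordiv (n : Int) 2 - 1
  -- first loop: conditional copies into two zero-filled children
  let copied := (List.range n).foldl
    (fun (c : List Int × List Int) i =>
      (if OS_P1.getD i 0 < cross_boundary then c.1.set i (OS_P1.getD i 0) else c.1,
       if OS_P2.getD i 0 < cross_boundary then c.2.set i (OS_P2.getD i 0) else c.2))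
    (List.replicate n 0, List.replicate n 0)
  -- second loop: scan-and-fill OS_C1 from OS_P2 (state = (OS_C1, index))
  let f1 := (List.range n).foldl
    (fun (s : List Int × Nat) i =>
      if OS_P2.getD i 0 ≥ cross_boundary then
        (s.1.set (pvSkip s.1 s.2) (OS_P2.getD i 0), pvSkip s.1 s.2)
      else s) (copied.1, 0)
  -- third loop: scan-and-fill OS_C2 from OS_P1
  let f2 := (List.range n).foldl
    (fun (s : List Int × Nat) i =>
      if OS_P1.getD i 0 ≥ cross_boundary then
        (s.1.set (pvSkip s.1 s.2) (OS_P1.getD i 0), pvSkip s.1 s.2)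
      else s) (copied.2, 0)
  (f1.1, f2.1)

-- ===== PORT B =====
-- Source B's weave: one pass over the parent with state (child, fill pointer k)
def pvWeave (cb : Int) (parent fill : List Int) : List Int :=
  (parent.foldl
    (fun (s : List Int × Nat) v =>
      if v < cb ∧ v ≠ 0 then (s.1 ++ [v], s.2)
      else if s.2 < fill.length then (s.1 ++ [fill.getD s.2 0], s.2 + 1)
      else (s.1 ++ [0], s.2)) ([], 0)).1

def OS_Crossover_alt (OS_P1 : List Int) (OS_P2 : List Int) : List Int × List Int :=
  let n := OS_P1.length
  let cross_boundary : Int := PySem.Int.floordiv (n : Int) 2 - 1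
  let P2 := OS_P2.take n
  let fill1 := P2.filter (fun v => decide (v ≥ cross_boundary))
  let fill2 := OS_P1.filter (fun v => decide (v ≥ cross_boundary))
  (pvWeave cross_boundary OS_P1 fill1, pvWeave cross_boundary P2 fill2)

-- ===== PRECONDITION & SPEC =====
-- Pre_ excludes (a) inputs where A raises IndexError (OS_P2 shorter than OS_P1, or more fill values than
-- empty slots on either side), and (b) inputs (possible only when n ≤ 3, when the boundary is ≤ 0) where a
-- genuine fill gene 0 is followed by a later fill gene: 0 is also A's empty-slot sentinel, so A overwrites
-- the just-placed 0 gene — an accidental corner where A's and B's values are both defensible.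
def Pre_OS_Crossover (OS_P1 : List Int) (OS_P2 : List Int) : Prop :=
  let n := OS_P1.length
  let cb : Int := PySem.Int.floordiv (n : Int) 2 - 1
  n ≤ OS_P2.length ∧
  (cb ≤ 0 → OS_P1.Pairwise (fun a b => a = 0 → b < cb) ∧
             (OS_P2.take n).Pairwise (fun a b => a = 0 → b < cb)) ∧
  (OS_P2.take n).countP (fun v => decide (v ≥ cb)) ≤ OS_P1.countP (fun v => decide (v ≥ cb ∨ v = 0)) ∧
  OS_P1.countP (fun v => decide (v ≥ cb)) ≤ (OS_P2.take n).countP (fun v => decide (v ≥ cb ∨ v = 0))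
instance (OS_P1 : List Int) (OS_P2 : List Int) : Decidable (Pre_OS_Crossover OS_P1 OS_P2) := by
  unfold Pre_OS_Crossover; infer_instance

def pvWitness_OS_Crossover : List Int × List Int := ([0, 1, 2, 3, 4, 5], [5, 4, 3, 2, 1, 0])

def Spec_OS_Crossover (OS_P1 : List Int) (OS_P2 : List Int) (out : List Int × List Int) : Prop := out = OS_Crossover_alt OS_P1 OS_P2
instance (OS_P1 : List Int) (OS_P2 : List Int) (out : List Int × List Int) : Decidable (Spec_OS_Crossover OS_P1 OS_P2 out) := by unfold Spec_OS_Crossover; infer_instance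

-- ===== CLAIM (what is proved, stated in full; the proofs are below) =====
def Claim_equal_OS_Crossover : Prop := ∀ (OS_P1 : List Int) (OS_P2 : List Int), Dom_OS_Crossover OS_P1 OS_P2 → Pre_OS_Crossover OS_P1 OS_P2 → Spec_OS_Crossover OS_P1 OS_P2 (OS_Crossover OS_P1 OS_P2)

-- ===== LEMMAS AND PROOFS =====

-- canonical description of both fill strategies: replace zeros left to right by the fill values
def fillZeros : List Int → List Int → List Int
  | [], _ => []
  | c :: cs, [] => c :: cs
  | c :: cs, v :: vs => if c = 0 then v :: fillZeros cs vs else c :: fillZeros cs (v :: vs)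

lemma fillZeros_nil_right (C : List Int) : fillZeros C [] = C := by
  cases C <;> rfl

lemma fillZeros_cons_ne (c : Int) (cs fs : List Int) (hc : c ≠ 0) :
    fillZeros (c :: cs) fs = c :: fillZeros cs fs := by
  cases fs with
  | nil => simp [fillZeros, fillZeros_nil_right]
  | cons v vs => simp [fillZeros, hc]

lemma fillZeros_cons_zero (cs : List Int) (v : Int) (vs : List Int) :
    fillZeros (0 :: cs) (v :: vs) = v :: fillZeros cs vs := by
  simp [fillZeros]

-- A's copy pass over a pair splits into two independent folds
lemma foldl_pair {α β γ : Type} (l : List γ) (g1 : α → γ → α) (g2 : β → γ → β) :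
    ∀ (a : α) (b : β),
      l.foldl (fun c i => (g1 c.1 i, g2 c.2 i)) (a, b) = (l.foldl g1 a, l.foldl g2 b) := by
  induction l with
  | nil => intro a b; rfl
  | cons x xs ih => intro a b; simp [List.foldl_cons, ih]

-- the conditional-set fold over range n on a zero list is the obvious map
lemma foldl_set_range (g : Nat → Int) (p : Nat → Prop) [DecidablePred p] :
    ∀ (n m : Nat), n ≤ m →
      (List.range n).foldl (fun c i => if p i then c.set i (g i) else c) (List.replicate m 0)
        = (List.range n).map (fun i => if p i then g i else 0) ++ List.replicate (m - n) 0 := by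
  intro n
  induction n with
  | zero => intro m _; simp
  | succ n ih =>
    intro m h
    rw [List.range_succ, List.foldl_append, ih m (by omega), List.map_append]
    have hrep : List.replicate (m - n) (0 : Int) = 0 :: List.replicate (m - (n + 1)) 0 := by
      rw [show m - n = (m - (n + 1)) + 1 by omega, List.replicate_succ]
    simp only [List.foldl_cons, List.foldl_nil, List.map_singleton]
    by_cases hp : p n
    · rw [if_pos hp, List.set_append_right n (g n) (by simp), hrep]
      simp [hp]
    · rw [if_neg hp, hrep]
      simp [hp]

-- a guarded fold over range = a plain fold over the filtered-and-mapped values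
lemma foldl_guard {σ : Type} (p : Nat → Prop) [DecidablePred p] (val : Nat → Int) (step : σ → Int → σ) :
    ∀ (l : List Nat) (s : σ),
      l.foldl (fun s i => if p i then step s (val i) else s) s
        = ((l.filter (fun i => decide (p i))).map val).foldl step s := by
  intro l
  induction l with
  | nil => intro s; rfl
  | cons x xs ih =>
    intro s
    by_cases h : p x <;> simp [List.foldl_cons, h, ih]

-- one scan-and-set step of A agrees with one fillZeros step
lemma step_eq (C : List Int) (v : Int) (vs : List Int) (hv : v ≠ 0) :
    ∀ (k idx : Nat), C.length - idx ≤ k →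
      (C.set (pvSkip C idx) v).take (pvSkip C idx)
          ++ fillZeros ((C.set (pvSkip C idx) v).drop (pvSkip C idx)) vs
        = C.take idx ++ fillZeros (C.drop idx) (v :: vs) := by
  intro k
  induction k with
  | zero =>
    intro idx hk
    have hge : C.length ≤ idx := by omega
    rw [pvSkip, dif_neg (by omega), List.set_eq_of_length_le hge,
      List.drop_eq_nil_of_le hge, List.take_of_length_le hge]
    rfl
  | succ k ihk =>
    intro idx hk
    by_cases hlt : idx < C.length
    · have hskip : pvSkip C idx = if C.getD idx 0 ≠ 0 then pvSkip C (idx + 1) else idx := by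
        rw [pvSkip, dif_pos hlt]
      by_cases hz : C.getD idx 0 = 0
      · have hj : pvSkip C idx = idx := by rw [hskip, if_neg (by simpa using hz)]
        have hd : List.drop idx C = C[idx] :: List.drop (idx + 1) C := List.drop_eq_getElem_cons hlt
        have h0 : C[idx] = (0 : Int) := by rw [← List.getD_eq_getElem C 0 hlt]; exact hz
        rw [hj, List.take_set_of_le le_rfl, List.drop_set, if_neg (lt_irrefl idx), Nat.sub_self,
          hd, List.set_cons_zero, fillZeros_cons_ne v _ vs hv, h0, fillZeros_cons_zero]
      · have hj : pvSkip C idx = pvSkip C (idx + 1) := by rw [hskip, if_pos (by simpa using hz)]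
        have hd : List.drop idx C = C[idx] :: List.drop (idx + 1) C := List.drop_eq_getElem_cons hlt
        have hne : C[idx] ≠ (0 : Int) := by rw [← List.getD_eq_getElem C 0 hlt]; exact hz
        rw [hj, ihk (idx + 1) (by omega), hd, fillZeros_cons_ne _ _ _ hne]
        have htake : List.take (idx + 1) C = List.take idx C ++ [C[idx]] := by
          rw [List.take_add_one, List.getElem?_eq_getElem hlt]; rfl
        rw [htake, List.append_assoc]
        rfl
    · have hge : C.length ≤ idx := by omega
      rw [pvSkip, dif_neg (by omega), List.set_eq_of_length_le hge,
        List.drop_eq_nil_of_le hge, List.take_of_length_le hge]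
      rfl

-- A's fill pass computes fillZeros
lemma fillA_eq (fs : List Int) :
    ∀ (C : List Int) (idx : Nat), (∀ u ∈ fs, u ≠ 0) →
      (fs.foldl (fun (s : List Int × Nat) v => (s.1.set (pvSkip s.1 s.2) v, pvSkip s.1 s.2)) (C, idx)).1
        = C.take idx ++ fillZeros (C.drop idx) fs := by
  induction fs with
  | nil =>
    intro C idx _
    simp [fillZeros_nil_right]
  | cons v vs ih =>
    intro C idx hnz
    have hv : v ≠ 0 := hnz v (by simp)
    have h := ih (C.set (pvSkip C idx) v) (pvSkip C idx) (fun u hu => hnz u (by simp [hu]))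
    simp only [List.foldl_cons] at *
    rw [h, step_eq C v vs hv (C.length - idx) idx le_rfl]

-- a trailing fill value 0 writes 0 into the first remaining zero slot: a no-op
lemma fillZeros_append_zero (gs : List Int) :
    ∀ (X : List Int), fillZeros X (gs ++ [0]) = fillZeros X gs := by
  induction gs with
  | nil =>
    intro X
    induction X with
    | nil => rfl
    | cons c cs ihX =>
      by_cases hc : c = 0
      · subst hc; rw [List.nil_append, fillZeros_cons_zero, fillZeros_nil_right, fillZeros_nil_right]
      · rw [List.nil_append] at ihX ⊢
        rw [fillZeros_cons_ne c cs [0] hc, fillZeros_nil_right, ihX, fillZeros_nil_right]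
  | cons v vs ih =>
    intro X
    induction X with
    | nil => rfl
    | cons c cs ihX =>
      by_cases hc : c = 0
      · subst hc; rw [List.cons_append, fillZeros_cons_zero, fillZeros_cons_zero, ih]
      · rw [fillZeros_cons_ne c cs _ hc, fillZeros_cons_ne c cs _ hc, ihX]

-- pvSkip lands on a zero entry or past the end
lemma pvSkip_spec (C : List Int) :
    ∀ (k idx : Nat), C.length - idx ≤ k →
      C.getD (pvSkip C idx) 0 = 0 ∨ C.length ≤ pvSkip C idx := by
  intro k
  induction k with
  | zero =>
    intro idx hk
    rw [pvSkip, dif_neg (by omega)]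
    right; omega
  | succ k ihk =>
    intro idx hk
    by_cases hlt : idx < C.length
    · rw [pvSkip, dif_pos hlt]
      by_cases hz : C.getD idx 0 = 0
      · rw [if_neg (by simpa using hz)]; left; exact hz
      · rw [if_pos (by simpa using hz)]; exact ihk (idx + 1) (by omega)
    · rw [pvSkip, dif_neg hlt]; right; omega

-- hence A's set of a fill value 0 never changes the child
lemma set_pvSkip_zero (C : List Int) (idx : Nat) : C.set (pvSkip C idx) 0 = C := by
  rcases pvSkip_spec C (C.length - idx) idx le_rfl with hz | hge
  · by_cases hlt : pvSkip C idx < C.length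
    · apply List.ext_getElem (by simp)
      intro i h1 h2
      rw [List.getElem_set]
      split
      · next heq =>
          rw [← List.getD_eq_getElem C 0 h2, ← heq, hz]
      · rfl
    · exact List.set_eq_of_length_le (by omega)
  · exact List.set_eq_of_length_le hge

-- a pairwise (a = 0 → b < cb) fill list whose members are all ≥ cb is zero-free,
-- or ends in its unique 0
lemma fill_split (cb : Int) :
    ∀ (fs : List Int), fs.Pairwise (fun a b => a = 0 → b < cb) → (∀ u ∈ fs, u ≥ cb) →
      (∀ u ∈ fs, u ≠ 0) ∨ ∃ gs, fs = gs ++ [0] ∧ ∀ u ∈ gs, u ≠ 0 := by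
  intro fs
  induction fs with
  | nil => intro _ _; left; intro u hu; cases hu
  | cons v vs ih =>
    intro hp hge
    rcases List.pairwise_cons.mp hp with ⟨hv, hvs⟩
    by_cases hz : v = 0
    · have hnil : vs = [] := by
        cases vs with
        | nil => rfl
        | cons w ws =>
          have h1 : w < cb := hv w (by simp) hz
          have h2 : w ≥ cb := hge w (by simp)
          omega
      subst hnil; subst hz
      right; exact ⟨[], rfl, fun u hu => by cases hu⟩
    · rcases ih hvs (fun u hu => hge u (by simp [hu])) with hL | ⟨gs, hgs, hnz⟩
      · left; intro u hu
        rcases List.mem_cons.mp hu with rfl | hu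
        · exact hz
        · exact hL u hu
      · right
        refine ⟨v :: gs, by rw [hgs, List.cons_append], fun u hu => ?_⟩
        rcases List.mem_cons.mp hu with rfl | hu
        · exact hz
        · exact hnz u hu

-- B's weave pass computes fillZeros of the copied child (no side condition needed:
-- a kept gene is nonzero by the guard, the copied value at a non-kept gene is 0)
lemma weave_eq (cb : Int) (fill : List Int) :
    ∀ (parent acc : List Int) (k : Nat),
      (parent.foldl
        (fun (s : List Int × Nat) v =>
          if v < cb ∧ v ≠ 0 then (s.1 ++ [v], s.2)
          else if s.2 < fill.length then (s.1 ++ [fill.getD s.2 0], s.2 + 1)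
          else (s.1 ++ [0], s.2)) (acc, k)).1
      = acc ++ fillZeros (parent.map (fun v => if v < cb then v else 0)) (fill.drop k) := by
  intro parent
  induction parent with
  | nil => intro acc k; simp [fillZeros]
  | cons v vs ih =>
    intro acc k
    simp only [List.foldl_cons, List.map_cons]
    by_cases hkeep : v < cb ∧ v ≠ 0
    · rw [if_pos hkeep, ih, if_pos hkeep.1, fillZeros_cons_ne _ _ _ hkeep.2,
        List.append_assoc]
      rfl
    · have hcopy : (if v < cb then v else 0) = 0 := by
        by_cases hv : v < cb
        · rw [if_pos hv]
          by_cases hz : v = 0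
          · exact hz
          · exact absurd ⟨hv, hz⟩ hkeep
        · rw [if_neg hv]
      rw [if_neg hkeep, hcopy]
      by_cases hk : k < fill.length
      · have hd : fill.drop k = fill[k] :: fill.drop (k + 1) := List.drop_eq_getElem_cons hk
        rw [if_pos hk, ih, hd, fillZeros_cons_zero, List.getD_eq_getElem fill 0 hk,
          List.append_assoc]
        rfl
      · have hd : fill.drop k = [] := List.drop_eq_nil_of_le (by omega)
        rw [if_neg hk, ih, hd, fillZeros_nil_right, fillZeros_nil_right, List.append_assoc]
        rfl

lemma range_map_getD (l : List Int) :
    ∀ (n : Nat), n ≤ l.length →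
      (List.range n).map (fun i => l.getD i 0) = l.take n := by
  intro n
  induction n with
  | zero => intro _; simp
  | succ n ih =>
    intro h
    rw [List.range_succ, List.map_append, ih (by omega), List.map_singleton,
      List.getD_eq_getElem l 0 (by omega), List.take_add_one,
      List.getElem?_eq_getElem (show n < l.length by omega)]
    rfl

-- filter-then-map over range indices = filter over the taken values
lemma filter_map_range (l : List Int) (n : Nat) (h : n ≤ l.length) (p : Int → Bool) :
    ((List.range n).filter (fun i => p (l.getD i 0))).map (fun i => l.getD i 0)
      = (l.take n).filter p := by
  rw [← range_map_getD l n h, List.filter_map]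
  rfl

-- one side of the crossover: A's scan-and-fill pass equals B's weave pass
lemma main_side (X Y : List Int) (n : Nat) (cb : Int)
    (hnX : n ≤ X.length) (hnY : n ≤ Y.length)
    (hzY : cb ≤ 0 → (Y.take n).Pairwise (fun a b => a = 0 → b < cb)) :
    ((List.range n).foldl
        (fun (s : List Int × Nat) i =>
          if Y.getD i 0 ≥ cb then (s.1.set (pvSkip s.1 s.2) (Y.getD i 0), pvSkip s.1 s.2) else s)
        ((List.range n).map (fun i => if X.getD i 0 < cb then X.getD i 0 else 0), 0)).1
      = pvWeave cb (X.take n) ((Y.take n).filter (fun v => decide (v ≥ cb))) := by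
  set C := (List.range n).map (fun i => if X.getD i 0 < cb then X.getD i 0 else 0) with hC
  set fs := ((List.range n).filter (fun i => decide (Y.getD i 0 ≥ cb))).map (fun i => Y.getD i 0) with hfs
  have hfseq : fs = (Y.take n).filter (fun v => decide (v ≥ cb)) := by
    rw [hfs, filter_map_range Y n hnY (fun v => decide (v ≥ cb))]
  have hgefs : ∀ u ∈ fs, u ≥ cb := by
    intro u hu
    rw [hfseq] at hu
    exact of_decide_eq_true (List.mem_filter.mp hu).2
  have hCmap : C = (X.take n).map (fun v => if v < cb then v else 0) := by
    rw [hC, ← range_map_getD X n hnX, List.map_map]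
    rfl
  have hsplit : (∀ u ∈ fs, u ≠ 0) ∨ ∃ gs, fs = gs ++ [0] ∧ ∀ u ∈ gs, u ≠ 0 := by
    by_cases hcb : cb ≤ 0
    · refine fill_split cb fs ?_ hgefs
      rw [hfseq]
      exact (hzY hcb).sublist ((Y.take n).filter_sublist)
    · left; intro u hu
      have := hgefs u hu
      intro h0; omega
  rw [foldl_guard (fun i => Y.getD i 0 ≥ cb) (fun i => Y.getD i 0)
      (fun (s : List Int × Nat) v => (s.1.set (pvSkip s.1 s.2) v, pvSkip s.1 s.2)) (List.range n) (C, 0)]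
  rw [← hfs]
  have hAside :
      (fs.foldl (fun (s : List Int × Nat) v => (s.1.set (pvSkip s.1 s.2) v, pvSkip s.1 s.2)) (C, 0)).1
        = fillZeros C fs := by
    rcases hsplit with hnz | ⟨gs, hgs, hnz⟩
    · rw [fillA_eq fs C 0 hnz]; simp
    · rw [hgs, List.foldl_append, fillZeros_append_zero]
      simp only [List.foldl_cons, List.foldl_nil]
      rw [set_pvSkip_zero, fillA_eq gs C 0 hnz]
      simp
  rw [hAside]
  unfold pvWeave
  rw [weave_eq cb ((Y.take n).filter (fun v => decide (v ≥ cb))) (X.take n) [] 0, ← hfseq, ← hCmap]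
  simp

-- ===== VERDICT (by name: the statement is the Claim_ definition above) =====
theorem OS_Crossover_spec : Claim_equal_OS_Crossover := by
  intro P1 P2 _ hpre
  unfold Pre_OS_Crossover at hpre
  unfold Spec_OS_Crossover OS_Crossover OS_Crossover_alt
  dsimp only
  set cb := PySem.Int.floordiv (P1.length : Int) 2 - 1 with hcb
  obtain ⟨hlen, hzero, hcnt1, hcnt2⟩ := hpre
  have htake1 : P1.take P1.length = P1 := List.take_length
  have hpair :
      (List.range P1.length).foldl
          (fun (c : List Int × List Int) i =>
            (if P1.getD i 0 < cb then c.1.set i (P1.getD i 0) else c.1,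
             if P2.getD i 0 < cb then c.2.set i (P2.getD i 0) else c.2))
          (List.replicate P1.length 0, List.replicate P1.length 0)
        = ((List.range P1.length).foldl
              (fun a i => if P1.getD i 0 < cb then a.set i (P1.getD i 0) else a)
              (List.replicate P1.length 0),
           (List.range P1.length).foldl
              (fun b i => if P2.getD i 0 < cb then b.set i (P2.getD i 0) else b)
              (List.replicate P1.length 0)) :=
    foldl_pair (List.range P1.length)
      (fun a i => if P1.getD i 0 < cb then a.set i (P1.getD i 0) else a)
      (fun b i => if P2.getD i 0 < cb then b.set i (P2.getD i 0) else b)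
      (List.replicate P1.length 0) (List.replicate P1.length 0)
  rw [hpair]
  have hset1 :
      (List.range P1.length).foldl
          (fun c i => if P1.getD i 0 < cb then c.set i (P1.getD i 0) else c)
          (List.replicate P1.length 0)
        = (List.range P1.length).map (fun i => if P1.getD i 0 < cb then P1.getD i 0 else 0)
            ++ List.replicate (P1.length - P1.length) 0 :=
    foldl_set_range (fun i => P1.getD i 0) (fun i => P1.getD i 0 < cb) P1.length P1.length le_rfl
  have hset2 :
      (List.range P1.length).foldl
          (fun c i => if P2.getD i 0 < cb then c.set i (P2.getD i 0) else c)
          (List.replicate P1.length 0)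
        = (List.range P1.length).map (fun i => if P2.getD i 0 < cb then P2.getD i 0 else 0)
            ++ List.replicate (P1.length - P1.length) 0 :=
    foldl_set_range (fun i => P2.getD i 0) (fun i => P2.getD i 0 < cb) P1.length P1.length le_rfl
  rw [hset1, hset2]
  simp only [Nat.sub_self, List.replicate_zero, List.append_nil]
  have h1 := main_side P1 P2 P1.length cb le_rfl hlen (fun h => (hzero h).2)
  have h2 := main_side P2 P1 P1.length cb hlen le_rfl
      (fun h => by rw [htake1]; exact (hzero h).1)
  rw [htake1] at h1 h2
  exact Prod.ext h1 h2
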